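-- pv_equiv track=rewrite | github.com/vinaymohndass68/numbers | cyclic.py | is_cyclic_number
-- ===== SOURCE A (Python) =====
-- def is_cyclic_number(n):
--     """Check if a number is a cyclic number by verifying cyclic permutations when multiplied by integers."""
--     # Convert number to a string to easily manipulate digits
--     str_n = str(n)
--     length = len(str_n)
--
--     # Generate cyclic permutations of the number
--     cyclic_permutations = {str_n[i:] + str_n[:i] for i in range(length)}
--
--     # Check if all products of n * (1, 2, ..., length) are cyclic permutations
--     for i in range(1, length + 1):
--         product = str(n * i)
--
--         # If the product is not a cyclic permutation of the original number, return False
--         if product not in cyclic_permutations: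
--             return False
--
--     return True
-- ===== SOURCE B (Python) =====
-- def is_cyclic_number(n):
--     """Check if a number is a cyclic number by verifying cyclic permutations when multiplied by integers."""
--     str_n = str(n)
--     length = len(str_n)
--     doubled = str_n + str_n
--     for i in range(1, length + 1):
--         product = str(n * i)
--         if len(product) != length or product not in doubled:
--             return False
--     return True
-- ===== Notes on version B (the rewrite author's own statement) =====
-- stated objective: idiomatic
-- what changed: B drops the precomputed set of all rotations and instead tests each product as a rotation by a same-length substring search in str_n+str_n.
import Mathlib
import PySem

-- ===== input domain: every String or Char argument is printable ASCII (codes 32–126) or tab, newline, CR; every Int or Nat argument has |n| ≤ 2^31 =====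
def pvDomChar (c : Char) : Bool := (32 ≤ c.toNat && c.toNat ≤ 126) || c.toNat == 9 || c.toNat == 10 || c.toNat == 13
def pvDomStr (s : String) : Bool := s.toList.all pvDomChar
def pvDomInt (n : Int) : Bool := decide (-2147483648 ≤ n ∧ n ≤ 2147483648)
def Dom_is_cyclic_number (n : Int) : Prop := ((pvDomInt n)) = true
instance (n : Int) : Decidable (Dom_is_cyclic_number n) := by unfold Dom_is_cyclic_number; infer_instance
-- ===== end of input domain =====

-- B replaces A's precomputed set of all rotations by a same-length substring test in str_n ++ str_n (idiomatic; same cost).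

-- ===== PORT A =====
-- str_n as List Char (= str(n)); slices/membership via PySem primitives
def is_cyclic_number (n : Int) : Bool :=
  let str_n := PySem.Int.toChars n
  let length := str_n.length
  -- {str_n[i:] + str_n[:i] for i in range(length)}
  let cyclic_permutations : PySem.Set (List Char) :=
    PySem.Set.ofList ((PySem.List.pyRange 0 (length : Int) 1).map
      (fun i => PySem.List.slice str_n (some i) none ++ PySem.List.slice str_n none (some i)))
  -- for i in range(1, length+1): if product not in set: return False
  (PySem.List.pyRange 1 ((length : Int) + 1) 1).all
    (fun i => PySem.Set.contains cyclic_permutations (PySem.Int.toChars (n * i)))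

-- ===== PORT B =====
def is_cyclic_number_alt (n : Int) : Bool :=
  let str_n := PySem.Int.toChars n
  let length := str_n.length
  let doubled := str_n ++ str_n
  (PySem.List.pyRange 1 ((length : Int) + 1) 1).all
    (fun i =>
      let product := PySem.Int.toChars (n * i)
      product.length == length && PySem.Chars.isIn product doubled)

-- ===== PRECONDITION & SPEC =====
def Spec_is_cyclic_number (n : Int) (out : Bool) : Prop := out = is_cyclic_number_alt n
instance (n : Int) (out : Bool) : Decidable (Spec_is_cyclic_number n out) := by unfold Spec_is_cyclic_number; infer_instance

-- ===== CLAIM (what is proved, stated in full; the proofs are below) =====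
def Claim_equal_is_cyclic_number : Prop := ∀ (n : Int), Dom_is_cyclic_number n → Spec_is_cyclic_number n (is_cyclic_number n)

-- ===== LEMMAS AND PROOFS =====

-- rotation of s = length-preserving infix of s ++ s
lemma rot_of_infix (s p t u : List Char) (hlen : p.length = s.length)
    (hit : t ++ p ++ u = s ++ s) (hk : t.length ≤ s.length) :
    s.drop t.length ++ s.take t.length = p := by
  have hdrop : (s ++ s).drop t.length = s.drop t.length ++ s := by
    rw [List.drop_append, Nat.sub_eq_zero_of_le hk, List.drop_zero]
  have h1 : p ++ u = s.drop t.length ++ s := by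
    rw [← hdrop, ← hit, List.append_assoc, List.drop_append, List.drop_length,
      Nat.sub_self, List.drop_zero, List.nil_append]
  have h2 : p = (s.drop t.length ++ s).take s.length := by
    rw [← h1, ← hlen, List.take_left]
  rw [h2, List.take_append, List.length_drop]
  have e1 : s.length - (s.length - t.length) = t.length := by omega
  rw [e1]
  congr 1
  exact (List.take_of_length_le (by rw [List.length_drop]; omega)).symm

lemma toDigitsCore_le_length (b : Nat) :
    ∀ (f n : Nat) (ds : List Char), ds.length ≤ (Nat.toDigitsCore b f n ds).length
  | 0, _, _ => le_refl _
  | f+1, n, ds => by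
      simp only [Nat.toDigitsCore]
      split
      · simp
      · exact le_trans (by simp) (toDigitsCore_le_length b f _ _)

lemma toChars_ne_nil (n : Int) : PySem.Int.toChars n ≠ [] := by
  have key : ∀ m : Nat, Nat.toDigits 10 m ≠ [] := by
    intro m
    unfold Nat.toDigits
    simp only [Nat.toDigitsCore]
    split
    · simp
    · intro h
      have := toDigitsCore_le_length 10 m (m / 10) [Nat.digitChar (m % 10)]
      rw [h] at this
      simp at this
  unfold PySem.Int.toChars
  split
  · simp
  · exact key _

-- p is in A's rotation list iff it has s's length and occurs in s ++ s (s nonempty)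
lemma mem_rotations_iff (s p : List Char) (hs : s ≠ []) :
    (p ∈ (PySem.List.pyRange 0 (s.length : Int) 1).map
      (fun i => PySem.List.slice s (some i) none ++ PySem.List.slice s none (some i)))
    ↔ (p.length = s.length ∧ p <:+: (s ++ s)) := by
  have hpos : 0 < s.length := List.length_pos_of_ne_nil hs
  rw [List.mem_map]
  constructor
  · rintro ⟨i, hi, rfl⟩
    rw [PySem.List.mem_pyRange_iff_of_pos (by norm_num)] at hi
    obtain ⟨k, rfl⟩ : ∃ k : Nat, i = (k : Int) := ⟨i.toNat, by omega⟩
    have hk : k ≤ s.length := by exact_mod_cast le_of_lt hi.2.1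
    rw [PySem.List.slice_from_natCast, PySem.List.slice_to_natCast]
    constructor
    · simp [List.length_drop, List.length_take]; omega
    · exact ⟨s.take k, s.drop k, by
        simp only [List.append_assoc, List.take_append_drop]
        rw [← List.append_assoc, List.take_append_drop]⟩
  · rintro ⟨hlen, t, u, hit⟩
    have hL : t.length + u.length = s.length := by
      have := congrArg List.length hit
      simp [hlen] at this; omega
    have hk : t.length ≤ s.length := by omega
    have hrot := rot_of_infix s p t u hlen hit hk
    by_cases hTL : t.length = s.length
    · -- p occurs at offset s.length, i.e. p = s: it is the i = 0 rotation
      have hp : s = p := by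
        rw [hTL, List.drop_length, List.nil_append, List.take_length] at hrot
        exact hrot
      refine ⟨((0 : Nat) : Int), ?_, ?_⟩
      · rw [PySem.List.mem_pyRange_iff_of_pos (by norm_num)]
        exact ⟨by omega, by exact_mod_cast hpos, by simp⟩
      · rw [PySem.List.slice_from_natCast, PySem.List.slice_to_natCast]
        simpa using hp
    · refine ⟨(t.length : Int), ?_, ?_⟩
      · rw [PySem.List.mem_pyRange_iff_of_pos (by norm_num)]
        refine ⟨by omega, ?_, by simp⟩
        have : t.length < s.length := lt_of_le_of_ne hk hTL
        exact_mod_cast this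
      · rw [PySem.List.slice_from_natCast, PySem.List.slice_to_natCast]
        exact hrot

theorem is_cyclic_number_spec : Claim_equal_is_cyclic_number := by
  intro n _
  unfold Spec_is_cyclic_number is_cyclic_number is_cyclic_number_alt
  show (PySem.List.pyRange 1 _ 1).all _ = (PySem.List.pyRange 1 _ 1).all _
  congr 1
  funext i
  rw [Bool.eq_iff_iff]
  simp only [PySem.Set.contains, Bool.and_eq_true, beq_iff_eq,
    List.contains_iff_mem, PySem.Chars.isIn_iff_infix, PySem.Set.mem_ofList,
    mem_rotations_iff _ _ (toChars_ne_nil n)]
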